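-- pv_equiv track=rewrite | github.com/BrauUu/beecrowd-solutions | python/1357.py | numToBraille
-- ===== SOURCE A (Python) =====
-- b = {
--     '1' : ["*.", "..", ".."],
--     '2' : ["*.", "*.", ".."],
--     '3' : ["**", "..", ".."],
--     '4' : ["**", ".*", ".."],
--     '5' : ["*.", ".*", ".."],
--     '6' : ["**", "*.", ".."],
--     '7' : ["**", "**", ".."],
--     '8' : ["*.", "**", ".."],
--     '9' : [".*", "*.", ".."],
--     '0' : [".*", "**", ".."],
-- }
--
-- def numToBraille(num):
--     res = ['', '', '']
--     for char in num:
--         res[0] += b[char][0] + ' '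
--         res[1] += b[char][1] + ' '
--         res[2] += b[char][2] + ' '
--     res[0] = res[0].rstrip()
--     res[1] = res[1].rstrip()
--     res[2] = res[2].rstrip()
--     return res
-- ===== SOURCE B (Python) =====
-- # Each digit's Braille cell encoded as a 6-bit mask (bit 2*r+c set = dot at row r, col c);
-- # columns are computed arithmetically and the grid is transposed with zip.
-- MASKS = [14, 1, 5, 3, 11, 9, 7, 15, 13, 6]
--
--
-- def _column(ch):
--     m = MASKS[int(ch)]
--     return [('*' if (m >> (2 * r)) & 1 else '.') +
--             ('*' if (m >> (2 * r + 1)) & 1 else '.')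
--             for r in range(3)]
--
--
-- def numToBraille(num):
--     cols = [_column(ch) for ch in num]
--     if not cols:
--         return ['', '', '']
--     return [' '.join(row) for row in zip(*cols)]
-- ===== Notes on version B (the rewrite author's own statement) =====
-- stated objective: alternative
-- what changed: B replaces A's dict of row-string triples with a 6-bit dot mask per digit, computes each digit's three cells by shift/mask arithmetic, and builds the output by transposing the list of columns with zip plus a space-join, instead of A's single pass appending cell-plus-space to three row accumulators and rstripping.
import Mathlib
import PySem

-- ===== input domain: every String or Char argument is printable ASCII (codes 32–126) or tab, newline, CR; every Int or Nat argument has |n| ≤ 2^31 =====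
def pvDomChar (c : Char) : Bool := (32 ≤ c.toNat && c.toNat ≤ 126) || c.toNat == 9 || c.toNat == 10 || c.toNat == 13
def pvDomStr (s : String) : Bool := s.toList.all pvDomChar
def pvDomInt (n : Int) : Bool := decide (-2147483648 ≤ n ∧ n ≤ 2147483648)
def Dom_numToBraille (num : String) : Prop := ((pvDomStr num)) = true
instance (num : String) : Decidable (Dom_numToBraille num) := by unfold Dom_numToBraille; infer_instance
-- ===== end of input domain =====

-- B encodes each digit as a 6-bit dot mask, computes each digit's 3-cell column arithmetically,
-- and transposes the column grid with zip, instead of A's dict-of-row-strings pass with rstrip (alternative).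


-- ===== PORT A =====
-- the module-level dict b (cell rows kept as List Char: Python string concatenation
-- is ported on List Char, which PySem.Chars makes exact)
def bDictA : PySem.Dict Char (List (List Char)) := PySem.Dict.mk
  [ ('1', [['*','.'], ['.','.'], ['.','.']]),
    ('2', [['*','.'], ['*','.'], ['.','.']]),
    ('3', [['*','*'], ['.','.'], ['.','.']]),
    ('4', [['*','*'], ['.','*'], ['.','.']]),
    ('5', [['*','.'], ['.','*'], ['.','.']]),
    ('6', [['*','*'], ['*','.'], ['.','.']]),
    ('7', [['*','*'], ['*','*'], ['.','.']]),
    ('8', [['*','.'], ['*','*'], ['.','.']]),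
    ('9', [['.','*'], ['*','.'], ['.','.']]),
    ('0', [['.','*'], ['*','*'], ['.','.']]) ]

-- b[char][i] (KeyError for a non-digit char is excluded by Pre_; the default is never read there)
def cellA (c : Char) (i : Int) : List Char :=
  PySem.List.pyGetD (PySem.Dict.getD bDictA c [[], [], []]) i []

def numToBraille (num : String) : List String :=
  let res := num.toList.foldl
    (fun (r : List Char × List Char × List Char) char =>
      (r.1 ++ cellA char 0 ++ [' '],
       r.2.1 ++ cellA char 1 ++ [' '],
       r.2.2 ++ cellA char 2 ++ [' ']))
    ([], [], [])
  [String.ofList (PySem.Chars.rstrip res.1),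
   String.ofList (PySem.Chars.rstrip res.2.1),
   String.ofList (PySem.Chars.rstrip res.2.2)]

-- ===== PORT B =====
-- MASKS, indexed by the digit's value (list indexing per Python semantics)
def masksB : List Int := [14, 1, 5, 3, 11, 9, 7, 15, 13, 6]

-- _column(ch): m = MASKS[int(ch)]; the r-comprehension (m >> k is floordiv by 2^k, & 1 is mod 2,
-- exact for Python's arithmetic-shift/bitand-on-int semantics; int(ch) via PySem.Int.ofStr?,
-- whose none case — a non-digit — is excluded by Pre_, so the defaults are never read there)
def columnB (ch : Char) : List String :=
  let m := PySem.List.pyGetD masksB ((PySem.Int.ofStr? (String.ofList [ch])).getD 0) 0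
  (PySem.List.pyRange 0 3 1).map (fun r =>
    String.ofList [ (if PySem.Int.mod (PySem.Int.floordiv m (2 ^ (2 * r).toNat)) 2 ≠ 0 then '*' else '.'),
                (if PySem.Int.mod (PySem.Int.floordiv m (2 ^ (2 * r + 1).toNat)) 2 ≠ 0 then '*' else '.') ])

-- zip(*cols): take heads while every list is nonempty (Python zip truncates at the shortest)
def zipGoB : List String → List (List String) → List (List String)
  | [], _ => []
  | x :: xs, rest =>
    if rest.all (fun ys => !ys.isEmpty) then
      (x :: rest.map (fun ys => ys.headD "")) :: zipGoB xs (rest.map List.tail)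
    else []

def pyZipStarB : List (List String) → List (List String)
  | [] => []
  | xs :: rest => zipGoB xs rest

def numToBraille_alt (num : String) : List String :=
  if (num.toList.map columnB).isEmpty then ["", "", ""]
  else (pyZipStarB (num.toList.map columnB)).map (fun row => PySem.Str.join " " row)

-- ===== PRECONDITION & SPEC =====
-- Pre_ excludes strings with a non-digit character, on which A raises KeyError.
def Pre_numToBraille (num : String) : Prop :=
  num.toList.all (fun c => ['0','1','2','3','4','5','6','7','8','9'].contains c) = true
instance (num : String) : Decidable (Pre_numToBraille num) := by unfold Pre_numToBraille; infer_instance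
def pvWitness_numToBraille : String := "120"

def Spec_numToBraille (num : String) (out : List String) : Prop := out = numToBraille_alt num
instance (num : String) (out : List String) : Decidable (Spec_numToBraille num out) := by unfold Spec_numToBraille; infer_instance

-- ===== CLAIM (what is proved, stated in full; the proofs are below) =====
def Claim_equal_numToBraille : Prop := ∀ (num : String), Dom_numToBraille num → Pre_numToBraille num → Spec_numToBraille num (numToBraille num)

-- ===== LEMMAS AND PROOFS =====

-- B's column is a 3-list; name its entries
def cB (ch : Char) (r : Int) : String :=
  let m := PySem.List.pyGetD masksB ((PySem.Int.ofStr? (String.ofList [ch])).getD 0) 0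
  String.ofList [ (if PySem.Int.mod (PySem.Int.floordiv m (2 ^ (2 * r).toNat)) 2 ≠ 0 then '*' else '.'),
              (if PySem.Int.mod (PySem.Int.floordiv m (2 ^ (2 * r + 1).toNat)) 2 ≠ 0 then '*' else '.') ]

lemma columnB_eq (ch : Char) : columnB ch = [cB ch 0, cB ch 1, cB ch 2] := by
  simp only [columnB, cB, show PySem.List.pyRange 0 3 1 = [0, 1, 2] from by decide,
    List.map_cons, List.map_nil]

-- B's cell, seen on code points, is A's cell (for digit chars and the three used rows)
lemma cB_toList (c : Char) (hc : ['0','1','2','3','4','5','6','7','8','9'].contains c = true)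
    (i : Int) (hi : i = 0 ∨ i = 1 ∨ i = 2) :
    (cB c i).toList = cellA c i := by
  have hc' : c ∈ ['0','1','2','3','4','5','6','7','8','9'] := by simpa using hc
  rcases hi with rfl | rfl | rfl <;> (fin_cases hc'; all_goals decide)

-- digit cells are nonempty and end in a non-space character, hence rstrip-fixed
lemma cellA_rstrip (c : Char) (hc : ['0','1','2','3','4','5','6','7','8','9'].contains c = true)
    (i : Int) (hi : i = 0 ∨ i = 1 ∨ i = 2) :
    PySem.Chars.rstrip (cellA c i) = cellA c i ∧ cellA c i ≠ [] := by
  have hc' : c ∈ ['0','1','2','3','4','5','6','7','8','9'] := by simpa using hc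
  rcases hi with rfl | rfl | rfl <;> (fin_cases hc'; all_goals exact ⟨by decide, by decide⟩)

lemma rstrip_append_space (xs : List Char) :
    PySem.Chars.rstrip (xs ++ [' ']) = PySem.Chars.rstrip xs := by
  unfold PySem.Chars.rstrip
  simp [show PySem.Chars.isspace ' ' = true from by decide]

lemma rstrip_append_of_ne_nil (a b : List Char) (hb : PySem.Chars.rstrip b ≠ []) :
    PySem.Chars.rstrip (a ++ b) = a ++ PySem.Chars.rstrip b := by
  unfold PySem.Chars.rstrip at *
  rw [List.reverse_append, List.dropWhile_append]
  have : (List.dropWhile PySem.Chars.isspace b.reverse).isEmpty = false := by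
    cases h : List.dropWhile PySem.Chars.isspace b.reverse with
    | nil => exact absurd (by simp [h]) hb
    | cons x xs => simp
  simp [this]

def bodyRow (i : Int) (cs : List Char) : List Char :=
  (cs.map (fun c => cellA c i ++ [' '])).flatten

lemma foldA (cs : List Char) (r0 r1 r2 : List Char) :
    cs.foldl
      (fun (r : List Char × List Char × List Char) char =>
        (r.1 ++ cellA char 0 ++ [' '],
         r.2.1 ++ cellA char 1 ++ [' '],
         r.2.2 ++ cellA char 2 ++ [' ']))
      (r0, r1, r2)
    = (r0 ++ bodyRow 0 cs, r1 ++ bodyRow 1 cs, r2 ++ bodyRow 2 cs) := by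
  induction cs generalizing r0 r1 r2 with
  | nil => simp [bodyRow]
  | cons c cs ih =>
    simp only [List.foldl_cons]
    rw [ih]
    simp [bodyRow, List.append_assoc]

lemma rstrip_body (i : Int) (hi : i = 0 ∨ i = 1 ∨ i = 2) (cs : List Char)
    (h : cs.all (fun c => ['0','1','2','3','4','5','6','7','8','9'].contains c) = true) :
    PySem.Chars.rstrip (bodyRow i cs) = PySem.Chars.join [' '] (cs.map (fun c => cellA c i)) := by
  induction cs with
  | nil => simp [bodyRow, PySem.Chars.join_nil, PySem.Chars.rstrip]
  | cons c cs ih =>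
    simp only [List.all_cons, Bool.and_eq_true] at h
    obtain ⟨hc, hcs⟩ := h
    obtain ⟨hfix, hne⟩ := cellA_rstrip c hc i hi
    cases cs with
    | nil =>
      have hb1 : bodyRow i [c] = cellA c i ++ [' '] := by simp [bodyRow]
      rw [hb1, rstrip_append_space, hfix, List.map_cons, List.map_nil,
        PySem.Chars.join_singleton]
    | cons c' cs' =>
      have hbody : bodyRow i (c :: c' :: cs') = (cellA c i ++ [' ']) ++ bodyRow i (c' :: cs') := by
        simp [bodyRow]
      have ihr := ih hcs
      have hne' : PySem.Chars.rstrip (bodyRow i (c' :: cs')) ≠ [] := by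
        rw [ihr]
        obtain ⟨_, hne''⟩ := cellA_rstrip c' (by simp_all) i hi
        rw [PySem.Chars.join]
        cases cs' <;> simp [List.intercalate] <;> simp_all
      rw [hbody, rstrip_append_of_ne_nil _ _ hne', ihr]
      simp only [List.map_cons]
      rw [PySem.Chars.join_cons_cons]

-- one zip step over a grid of 3-columns
lemma zipGo_three (a0 a1 a2 : String) (cs : List Char) (f0 f1 f2 : Char → String) :
    zipGoB [a0, a1, a2] (cs.map (fun ch => [f0 ch, f1 ch, f2 ch])) =
      [a0 :: cs.map f0, a1 :: cs.map f1, a2 :: cs.map f2] := by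
  have h3 : ∀ (g h k : Char → String),
      (cs.map (fun ch => [g ch, h ch, k ch])).all (fun ys => !ys.isEmpty) = true := by
    intro g h k; simp [List.all_map]
  simp [zipGoB, h3, List.map_map, Function.comp]


lemma pyZipStar_cols (c : Char) (cs : List Char) :
    pyZipStarB ((c :: cs).map columnB) =
      [(c :: cs).map (fun ch => cB ch 0),
       (c :: cs).map (fun ch => cB ch 1),
       (c :: cs).map (fun ch => cB ch 2)] := by
  have hmap : cs.map columnB = cs.map (fun ch => [cB ch 0, cB ch 1, cB ch 2]) := by
    apply List.map_congr_left; intro x _; exact columnB_eq x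
  simp only [List.map_cons, columnB_eq, pyZipStarB, hmap]
  rw [zipGo_three]

-- ===== VERDICT (by name: the statement is the Claim_ definition above) =====
theorem numToBraille_spec : Claim_equal_numToBraille := by
  intro num _ hpre
  unfold Spec_numToBraille
  unfold Pre_numToBraille at hpre
  cases hcs : num.toList with
  | nil =>
    have hnum : num = "" := String.toList_injective (by rw [hcs]; rfl)
    subst hnum; decide
  | cons c cs =>
    rw [hcs] at hpre
    unfold numToBraille numToBraille_alt
    rw [hcs, foldA, if_neg (by simp), pyZipStar_cols]
    simp only [List.map_cons, List.map_nil, List.nil_append]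
    have key : ∀ i : Int, i = 0 ∨ i = 1 ∨ i = 2 →
        PySem.Str.join " " ((c :: cs).map (fun ch => cB ch i))
        = String.ofList (PySem.Chars.rstrip (bodyRow i (c :: cs))) := by
      intro i hi
      apply String.toList_injective
      rw [PySem.Str.toList_join, rstrip_body i hi (c :: cs) hpre, List.map_map]
      have hsep : (" " : String).toList = [' '] := by decide
      rw [hsep, String.toList_ofList]
      refine congrArg (PySem.Chars.join [' ']) (List.map_congr_left ?_)
      intro x hxmem
      have hx : (['0','1','2','3','4','5','6','7','8','9'].contains x) = true := by
        simp only [List.all_eq_true] at hpre; exact hpre x hxmem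
      exact cB_toList x hx i hi
    have k0 := key 0 (by tauto); have k1 := key 1 (by tauto); have k2 := key 2 (by tauto)
    simp only [List.map_cons] at k0 k1 k2
    rw [k0, k1, k2]
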